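-- pv_equiv track=rewrite | github.com/stapler343/AdventOfCode | 2024/Day7/Part1.py | try_next_nums
-- ===== SOURCE A (Python) =====
-- def try_next_nums(answer, current, next_nums):
--     # for j in range(0,len(next_nums)):
--         #try applying a + or * operator
--         #if tried operation, break
--         #apply operation
--     # operators = ['+','*']
--     next_num = int(next_nums[0])
--     # prev_total = current
--
--     added = current + next_num
--     multiplied = current * next_num
--
--     #try additions
--     total_found = 0
--     if added==answer and len(next_nums)==1: #found success on the last test value... return it back
--         return answer
--     elif added <= answer and len(next_nums)>1:
--         total_found=try_next_nums(answer, added, next_nums[1:])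
--         if total_found is not None and total_found!=0:
--             return total_found
--     #try multiplications
--     if multiplied==answer and len(next_nums)==1: #found success on the last test value... return it back
--         return answer
--     elif multiplied <= answer and len(next_nums)>1:
--         total_found=try_next_nums(answer, multiplied, next_nums[1:])
--         if total_found is not None and total_found!=0:
--             return total_found
-- ===== SOURCE B (Python) =====
-- def try_next_nums(answer, current, next_nums):
--     # Forward DP: the set of partial totals reachable so far, pruning totals
--     # above answer (same prune as the recursive search); one pass over the list.
--     last = next_nums[-1]
--     vals = {current}
--     for num in next_nums[:-1]:
--         vals = {r for v in vals for r in (v + num, v * num) if r <= answer}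
--     if any(v + last == answer or v * last == answer for v in vals):
--         return answer
-- ===== Notes on version B (the rewrite author's own statement) =====
-- stated objective: alternative
-- what changed: Replaces A's depth-first recursion over +/* operator choices by a single forward pass that keeps the deduplicated set of reachable partial totals (same <= answer prune) and checks the last number against that set.
-- intended difference: When answer is 0, at least two numbers remain and some +/* operator assignment reaches 0 while keeping every partial total at or below 0 (the prune both versions apply), A's 'total_found != 0' sentinel discards the found solution and A returns None, while B returns the answer 0, the intended value whenever some combination reaches it. — e.g. on try_next_nums(0, 0, [1, 1]): A returns none, B returns some 0
import Mathlib
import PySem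

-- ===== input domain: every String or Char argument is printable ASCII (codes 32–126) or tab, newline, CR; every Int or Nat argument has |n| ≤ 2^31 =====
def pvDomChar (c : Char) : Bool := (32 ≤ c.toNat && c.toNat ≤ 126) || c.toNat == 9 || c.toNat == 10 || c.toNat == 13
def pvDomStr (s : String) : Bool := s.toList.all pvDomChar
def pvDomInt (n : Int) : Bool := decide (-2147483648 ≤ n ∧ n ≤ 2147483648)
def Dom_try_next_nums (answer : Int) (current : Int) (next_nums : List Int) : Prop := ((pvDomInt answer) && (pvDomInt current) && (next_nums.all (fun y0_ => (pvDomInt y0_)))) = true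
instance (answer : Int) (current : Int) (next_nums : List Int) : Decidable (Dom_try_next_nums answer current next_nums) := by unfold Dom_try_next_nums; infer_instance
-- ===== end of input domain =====

-- B replaces A's depth-first recursion over +/* operator choices by a single
-- forward pass keeping the SET of reachable partial totals (same `≤ answer` prune).

-- ===== PORT A =====
def try_next_nums (answer : Int) (current : Int) (next_nums : List Int) : Option Int :=
  match next_nums with
  | [] => none  -- next_nums[0] raises IndexError here; excluded by Pre_
  | next_num :: rest =>
    let added := current + next_num
    let multiplied := current * next_num
    -- try additions
    let afterAdd : Option Int :=
      if added = answer ∧ rest.length = 0 then some answer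
      else if added ≤ answer ∧ rest.length > 0 then
        match try_next_nums answer added rest with
        | some t => if t ≠ 0 then some t else none
        | none => none
      else none
    match afterAdd with
    | some t => some t
    | none =>
      -- try multiplications
      if multiplied = answer ∧ rest.length = 0 then some answer
      else if multiplied ≤ answer ∧ rest.length > 0 then
        match try_next_nums answer multiplied rest with
        | some t => if t ≠ 0 then some t else none
        | none => none
      else none

-- ===== PORT B =====
-- one `vals = {r for v in vals for r in (v+num, v*num) if r <= answer}` update
def altAdd (answer num : Int) (acc : PySem.Set Int) (v : Int) : PySem.Set Int :=
  let acc1 := if v + num ≤ answer then PySem.Set.add acc (v + num) else acc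
  if v * num ≤ answer then PySem.Set.add acc1 (v * num) else acc1

def altStep (answer : Int) (vals : PySem.Set Int) (num : Int) : PySem.Set Int :=
  vals.foldl (altAdd answer num) PySem.Set.empty

def try_next_nums_alt (answer : Int) (current : Int) (next_nums : List Int) : Option Int :=
  match PySem.List.pyGet? next_nums (-1) with
  | none => none  -- next_nums[-1] raises IndexError here; excluded by Pre_
  | some last =>
    let init := PySem.List.slice next_nums none (some (-1))
    let vals := init.foldl (altStep answer) (PySem.Set.ofList [current])
    if vals.any (fun v => v + last == answer || v * last == answer) then some answer else none

-- ===== PRECONDITION & SPEC =====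
-- Pre_ excludes only the empty list, on which Python A raises IndexError (next_nums[0]).
def Pre_try_next_nums (answer : Int) (current : Int) (next_nums : List Int) : Prop := next_nums ≠ []
instance (answer : Int) (current : Int) (next_nums : List Int) : Decidable (Pre_try_next_nums answer current next_nums) := by unfold Pre_try_next_nums; infer_instance
def pvWitness_try_next_nums : Int × Int × List Int := (6, 1, [2, 3])

-- spec predicate for D_ (not either port's algorithm: A recurses with a 0-sentinel and a
-- separate last-element case, B folds a deduplicated set forward): does some choice of
-- +/* operators turn cur into 0 while every partial total stays ≤ 0 (the prune)?
def hits0 (cur : Int) : List Int → Bool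
  | [] => cur == 0
  | n :: t => (decide (cur + n ≤ 0) && hits0 (cur + n) t) ||
              (decide (cur * n ≤ 0) && hits0 (cur * n) t)

-- When answer is 0 and at least two numbers remain, and some +/* operator assignment turns
-- current into 0 with every partial total staying ≤ 0 (the prune both versions apply), A's
-- `total_found != 0` sentinel discards the found solution and A returns None, while B returns 0,
-- the intended value whenever some combination reaches the answer.
def D_try_next_nums (answer : Int) (current : Int) (next_nums : List Int) : Prop :=
  answer = 0 ∧ 2 ≤ next_nums.length ∧
    hits0 current next_nums = true
instance (answer : Int) (current : Int) (next_nums : List Int) : Decidable (D_try_next_nums answer current next_nums) := by unfold D_try_next_nums; infer_instance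

def Spec_try_next_nums (answer : Int) (current : Int) (next_nums : List Int) (out : Option Int) : Prop := ¬ D_try_next_nums answer current next_nums → out = try_next_nums_alt answer current next_nums
instance (answer : Int) (current : Int) (next_nums : List Int) (out : Option Int) : Decidable (Spec_try_next_nums answer current next_nums out) := by unfold Spec_try_next_nums; infer_instance

def pvDiffWitness_try_next_nums : Int × Int × List Int := (0, 0, [1, 1])
def pvDiffWitnessOut_try_next_nums : (Option Int) × (Option Int) := (none, some 0)

-- ===== CLAIM (what is proved, stated in full; the proofs are below) =====
def Claim_unchanged_try_next_nums : Prop := ∀ (answer : Int) (current : Int) (next_nums : List Int), Dom_try_next_nums answer current next_nums → Pre_try_next_nums answer current next_nums → Spec_try_next_nums answer current next_nums (try_next_nums answer current next_nums)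
def Claim_changed_try_next_nums : Prop := Dom_try_next_nums (pvDiffWitness_try_next_nums.1) (pvDiffWitness_try_next_nums.2.1) (pvDiffWitness_try_next_nums.2.2) ∧ Pre_try_next_nums (pvDiffWitness_try_next_nums.1) (pvDiffWitness_try_next_nums.2.1) (pvDiffWitness_try_next_nums.2.2) ∧ D_try_next_nums (pvDiffWitness_try_next_nums.1) (pvDiffWitness_try_next_nums.2.1) (pvDiffWitness_try_next_nums.2.2) ∧ try_next_nums (pvDiffWitness_try_next_nums.1) (pvDiffWitness_try_next_nums.2.1) (pvDiffWitness_try_next_nums.2.2) = pvDiffWitnessOut_try_next_nums.1 ∧ try_next_nums_alt (pvDiffWitness_try_next_nums.1) (pvDiffWitness_try_next_nums.2.1) (pvDiffWitness_try_next_nums.2.2) = pvDiffWitnessOut_try_next_nums.2 ∧ pvDiffWitnessOut_try_next_nums.1 ≠ pvDiffWitnessOut_try_next_nums.2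
def Claim_exact_try_next_nums : Prop := ∀ (answer : Int) (current : Int) (next_nums : List Int), Dom_try_next_nums answer current next_nums → Pre_try_next_nums answer current next_nums → D_try_next_nums answer current next_nums → try_next_nums answer current next_nums ≠ try_next_nums_alt answer current next_nums

-- ===== LEMMAS AND PROOFS =====

-- whether some +/* combination turns cur into answer at the last element, every intermediate
-- total staying ≤ answer (the prune both programs apply)
def reachesWithPrune (answer : Int) (cur : Int) : List Int → Bool
  | [] => false
  | [n] => (cur + n == answer) || (cur * n == answer)
  | n :: m :: rest =>
    (decide (cur + n ≤ answer) && reachesWithPrune answer (cur + n) (m :: rest)) ||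
    (decide (cur * n ≤ answer) && reachesWithPrune answer (cur * n) (m :: rest))

theorem reaches_cons (answer cur n : Int) (rest : List Int) (h : rest ≠ []) :
    reachesWithPrune answer cur (n :: rest) =
      ((decide (cur + n ≤ answer) && reachesWithPrune answer (cur + n) rest) ||
       (decide (cur * n ≤ answer) && reachesWithPrune answer (cur * n) rest)) := by
  cases rest with
  | nil => exact absurd rfl h
  | cons m r => rfl

theorem hits0_eq : ∀ (l : List Int), l ≠ [] → ∀ c : Int, hits0 c l = reachesWithPrune 0 c l := by
  intro l
  induction l with
  | nil => intro h; exact absurd rfl h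
  | cons n t ih =>
    intro _ c
    cases t with
    | nil =>
      have key : ∀ x : Int, (decide (x ≤ 0) && (x == 0)) = (x == 0) := by
        intro x; by_cases hx : x = 0 <;> simp [hx]
      simp [hits0, reachesWithPrune, key]
    | cons m r =>
      rw [show hits0 c (n :: m :: r) =
            ((decide (c + n ≤ 0) && hits0 (c + n) (m :: r)) ||
             (decide (c * n ≤ 0) && hits0 (c * n) (m :: r))) from rfl,
          reaches_cons 0 c n (m :: r) (by simp), ih (by simp) (c + n), ih (by simp) (c * n)]

theorem hitD (nums : List Int) (h : nums ≠ []) (c : Int) :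
    hits0 c nums = true ↔ reachesWithPrune 0 c nums = true := by
  rw [hits0_eq nums h]

theorem mem_altAdd (answer num : Int) (acc : PySem.Set Int) (c v : Int) :
    v ∈ altAdd answer num acc c ↔
      v ∈ acc ∨ (v = c + num ∧ c + num ≤ answer) ∨ (v = c * num ∧ c * num ≤ answer) := by
  by_cases hA : c + num ≤ answer <;> by_cases hM : c * num ≤ answer <;>
    simp [altAdd, hA, hM, PySem.Set.mem_add] <;> tauto

theorem mem_altAdd_fold (answer num : Int) (l : List Int) : ∀ (acc : PySem.Set Int) (v : Int),
    v ∈ l.foldl (altAdd answer num) acc ↔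
      v ∈ acc ∨ ∃ c ∈ l, (v = c + num ∧ c + num ≤ answer) ∨ (v = c * num ∧ c * num ≤ answer) := by
  induction l with
  | nil => intro acc v; simp
  | cons c l ih =>
    intro acc v
    rw [List.foldl_cons, ih, mem_altAdd]
    simp only [List.mem_cons]
    constructor
    · rintro ((h | h) | ⟨d, hd, h⟩)
      · exact Or.inl h
      · exact Or.inr ⟨c, Or.inl rfl, h⟩
      · exact Or.inr ⟨d, Or.inr hd, h⟩
    · rintro (h | ⟨d, (rfl | hd), h⟩)
      · exact Or.inl (Or.inl h)
      · exact Or.inl (Or.inr h)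
      · exact Or.inr ⟨d, hd, h⟩

theorem mem_altStep (answer num : Int) (S : PySem.Set Int) (v : Int) :
    v ∈ altStep answer S num ↔
      ∃ c ∈ S, (v = c + num ∧ c + num ≤ answer) ∨ (v = c * num ∧ c * num ≤ answer) := by
  unfold altStep
  rw [mem_altAdd_fold]
  simp [PySem.Set.empty]

theorem any_altStep (answer num : Int) (S : PySem.Set Int) (P : Int → Bool) :
    (altStep answer S num).any P =
      S.any (fun c => (decide (c + num ≤ answer) && P (c + num)) ||
                      (decide (c * num ≤ answer) && P (c * num))) := by
  rw [Bool.eq_iff_iff]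
  simp only [List.any_eq_true, mem_altStep, Bool.or_eq_true, Bool.and_eq_true, decide_eq_true_eq]
  constructor
  · rintro ⟨v, ⟨c, hc, (⟨rfl, h⟩ | ⟨rfl, h⟩)⟩, hp⟩
    · exact ⟨c, hc, Or.inl ⟨h, hp⟩⟩
    · exact ⟨c, hc, Or.inr ⟨h, hp⟩⟩
  · rintro ⟨c, hc, (⟨h, hp⟩ | ⟨h, hp⟩)⟩
    · exact ⟨c + num, ⟨c, hc, Or.inl ⟨rfl, h⟩⟩, hp⟩
    · exact ⟨c * num, ⟨c, hc, Or.inr ⟨rfl, h⟩⟩, hp⟩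

theorem fold_any (answer last : Int) : ∀ (init : List Int) (S : PySem.Set Int),
    ((init.foldl (altStep answer) S).any (fun v => v + last == answer || v * last == answer)) =
      (S.any (fun c => reachesWithPrune answer c (init ++ [last]))) := by
  intro init
  induction init with
  | nil => intro S; rfl
  | cons n init ih =>
    intro S
    rw [List.foldl_cons, ih, any_altStep]
    congr 1
    funext c
    rw [List.cons_append, reaches_cons answer c n (init ++ [last]) (by simp)]

theorem A_one (answer cur n : Int) (rest : List Int) :
    try_next_nums answer cur (n :: rest) =
      (match (if cur + n = answer ∧ rest.length = 0 then some answer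
              else if cur + n ≤ answer ∧ rest.length > 0 then
                match try_next_nums answer (cur + n) rest with
                | some t => if t ≠ 0 then some t else none
                | none => none
              else none : Option Int) with
       | some t => some t
       | none =>
         if cur * n = answer ∧ rest.length = 0 then some answer
         else if cur * n ≤ answer ∧ rest.length > 0 then
           match try_next_nums answer (cur * n) rest with
           | some t => if t ≠ 0 then some t else none
           | none => none
         else none) := rfl

theorem A_char (answer : Int) : ∀ (nums : List Int), ∀ (cur : Int), nums ≠ [] →
    try_next_nums answer cur nums =
      if reachesWithPrune answer cur nums ∧ (answer ≠ 0 ∨ nums.length = 1) then some answer else none := by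
  intro nums
  induction nums with
  | nil => intro cur h; exact absurd rfl h
  | cons n rest ih =>
    intro cur _
    cases rest with
    | nil =>
      by_cases h1 : cur + n = answer <;> by_cases h2 : cur * n = answer <;>
        simp [try_next_nums, reachesWithPrune, h1, h2]
    | cons m r =>
      have inner : ∀ v : Int,
          (if v = answer ∧ (m :: r).length = 0 then some answer
           else if v ≤ answer ∧ (m :: r).length > 0 then
             match try_next_nums answer v (m :: r) with
             | some t => if t ≠ 0 then some t else none
             | none => none
           else none) =
          if v ≤ answer ∧ (reachesWithPrune answer v (m :: r) ∧ answer ≠ 0) then some answer else none := by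
        intro v
        rw [ih v (by simp)]
        by_cases hv : v ≤ answer <;> by_cases ha : answer = 0 <;>
          cases hb : reachesWithPrune answer v (m :: r) <;>
          by_cases hlen1 : (m :: r).length = 1 <;>
          simp_all
      rw [A_one answer cur n (m :: r), inner (cur + n), inner (cur * n)]
      by_cases ha : answer = 0 <;>
        by_cases h1 : cur + n ≤ answer <;>
        by_cases h2 : cur * n ≤ answer <;>
        cases hb1 : reachesWithPrune answer (cur + n) (m :: r) <;>
        cases hb2 : reachesWithPrune answer (cur * n) (m :: r) <;>
        simp [reachesWithPrune, ha, h1, h2, hb1, hb2]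

theorem B_char (answer cur : Int) (nums : List Int) (h : nums ≠ []) :
    try_next_nums_alt answer cur nums = if reachesWithPrune answer cur nums then some answer else none := by
  unfold try_next_nums_alt
  rw [PySem.List.pyGet?_neg_one, List.getLast?_eq_some_getLast h]
  simp only [PySem.List.slice_to_neg_one]
  rw [fold_any]
  have hS : PySem.Set.ofList [cur] = [cur] := rfl
  rw [hS]
  have hrw : reachesWithPrune answer cur (nums.dropLast ++ [nums.getLast h]) = reachesWithPrune answer cur nums := by
    rw [List.dropLast_append_getLast h]
  simp [hrw]

-- ===== VERDICT (by name: the statement is the Claim_ definition above) =====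
theorem try_next_nums_spec : Claim_unchanged_try_next_nums := by
  intro answer current nums hdom hpre
  unfold Spec_try_next_nums
  intro hnd
  rw [A_char answer nums current hpre, B_char answer current nums hpre]
  by_cases hlen : nums.length = 1
  · simp [hlen]
  · by_cases ha : answer = 0
    · subst ha
      have h2 : 2 ≤ nums.length := by
        cases nums with
        | nil => exact absurd rfl hpre
        | cons a t => simp only [List.length_cons] at hlen ⊢; omega
      have hr : reachesWithPrune 0 current nums = false := by
        cases hcon : reachesWithPrune 0 current nums
        · rfl
        · exact absurd (show D_try_next_nums 0 current nums by
            unfold D_try_next_nums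
            exact ⟨rfl, h2, (hitD nums hpre current).mpr hcon⟩) hnd
      simp [hr]
    · simp [ha]

theorem try_next_nums_changed : Claim_changed_try_next_nums := by
  unfold Claim_changed_try_next_nums; decide

theorem try_next_nums_tight : Claim_exact_try_next_nums := by
  intro answer current nums hdom hpre hD
  unfold D_try_next_nums at hD
  obtain ⟨ha, h2, hmem⟩ := hD
  subst ha
  have hr : reachesWithPrune 0 current nums = true := (hitD nums hpre current).mp hmem
  have hlen : nums.length ≠ 1 := by omega
  rw [A_char 0 nums current hpre, B_char 0 current nums hpre]
  simp [hr, hlen]
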